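-- pv_equiv track=rewrite | github.com/ritikdrona/programs | python/numberOfCarsAtmaxSpeed.py | findNumberOfCarsAtMaxSpeed
-- ===== SOURCE A (Python) =====
-- def findNumberOfCarsAtMaxSpeed(maxSpeeds):
--     numberOfCars = len(maxSpeeds)
--     if numberOfCars == 0: return 0
--
--     numberOfCarsAtMaxSpeed = 1
--     currentMaxPossibleSpeed = maxSpeeds[0]
--     for i in range(1, numberOfCars):
--         if maxSpeeds[i] <= currentMaxPossibleSpeed:
--             currentMaxPossibleSpeed = maxSpeeds[i]
--             numberOfCarsAtMaxSpeed = numberOfCarsAtMaxSpeed + 1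
--
--     return numberOfCarsAtMaxSpeed
-- ===== SOURCE B (Python) =====
-- def findNumberOfCarsAtMaxSpeed(maxSpeeds):
--     if not maxSpeeds:
--         return 0
--     # pass 1: running-minimum table (running[i] = min of maxSpeeds[0..i])
--     running = []
--     m = maxSpeeds[0]
--     for x in maxSpeeds:
--         m = min(m, x)
--         running.append(m)
--     # pass 2: count cars blocked to (or already at) the minimum ahead of them
--     return 1 + sum(1 for i in range(1, len(maxSpeeds))
--                    if maxSpeeds[i] <= running[i - 1])
-- ===== Notes on version B (the rewrite author's own statement) =====
-- stated objective: alternative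
-- what changed: B materialises a prefix-minimum table in one pass and then counts matches against it in a separate pass, instead of A's single fused loop that updates the minimum and the counter together.
import Mathlib
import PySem

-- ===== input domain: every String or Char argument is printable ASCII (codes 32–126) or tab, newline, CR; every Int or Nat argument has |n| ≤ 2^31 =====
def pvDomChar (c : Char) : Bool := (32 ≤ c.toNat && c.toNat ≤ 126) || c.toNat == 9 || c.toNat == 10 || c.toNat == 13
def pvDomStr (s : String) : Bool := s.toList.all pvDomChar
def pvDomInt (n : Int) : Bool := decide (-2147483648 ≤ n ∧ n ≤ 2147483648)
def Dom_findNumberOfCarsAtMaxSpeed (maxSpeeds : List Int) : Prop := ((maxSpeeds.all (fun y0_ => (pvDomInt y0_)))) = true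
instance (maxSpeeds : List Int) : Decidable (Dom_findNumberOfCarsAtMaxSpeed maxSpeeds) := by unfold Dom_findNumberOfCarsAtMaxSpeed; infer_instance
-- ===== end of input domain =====

-- B builds a prefix-minimum table in one pass, then counts in a separate pass; alternative decomposition, same O(n) cost.

-- ===== PORT A =====
-- Literal port of A: fused loop over range(1, n) carrying (count, current minimum).
-- All indices are in range, so pyGetD is exact here.
def findNumberOfCarsAtMaxSpeed (maxSpeeds : List Int) : Int :=
  let numberOfCars : Int := maxSpeeds.length
  if numberOfCars = 0 then 0
  else
    ((PySem.List.pyRange 1 numberOfCars 1).foldl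
      (fun (st : Int × Int) i =>
        if PySem.List.pyGetD maxSpeeds i 0 ≤ st.2 then
          (st.1 + 1, PySem.List.pyGetD maxSpeeds i 0)
        else st)
      (1, PySem.List.pyGetD maxSpeeds 0 0)).1

-- ===== PORT B =====
-- Literal port of Source B: pass 1 appends running minima; pass 2 counts over range(1, n).
def findNumberOfCarsAtMaxSpeed_alt (maxSpeeds : List Int) : Int :=
  match maxSpeeds with
  | [] => 0
  | x0 :: _ =>
    let running := (maxSpeeds.foldl
      (fun (st : List Int × Int) x =>
        let m := min st.2 x
        (st.1 ++ [m], m)) (([] : List Int), x0)).1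
    1 + (PySem.List.pyRange 1 (maxSpeeds.length : Int) 1).foldl
      (fun c i =>
        if PySem.List.pyGetD maxSpeeds i 0 ≤ PySem.List.pyGetD running (i - 1) 0 then c + 1
        else c) 0

-- ===== PRECONDITION & SPEC =====
def Spec_findNumberOfCarsAtMaxSpeed (maxSpeeds : List Int) (out : Int) : Prop := out = findNumberOfCarsAtMaxSpeed_alt maxSpeeds
instance (maxSpeeds : List Int) (out : Int) : Decidable (Spec_findNumberOfCarsAtMaxSpeed maxSpeeds out) := by unfold Spec_findNumberOfCarsAtMaxSpeed; infer_instance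

-- ===== CLAIM (what is proved, stated in full; the proofs are below) =====
def Claim_equal_findNumberOfCarsAtMaxSpeed : Prop := ∀ (maxSpeeds : List Int), Dom_findNumberOfCarsAtMaxSpeed maxSpeeds → Spec_findNumberOfCarsAtMaxSpeed maxSpeeds (findNumberOfCarsAtMaxSpeed maxSpeeds)

-- ===== LEMMAS AND PROOFS =====

-- the list of running minima of l starting from seed m
def pvScanMin (m : Int) : List Int → List Int
  | [] => []
  | x :: t => (min m x) :: pvScanMin (min m x) t

-- B's first loop builds exactly pvScanMin
theorem pvBuild (l : List Int) (acc : List Int) (m : Int) :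
    (l.foldl (fun (st : List Int × Int) x => (st.1 ++ [min st.2 x], min st.2 x)) (acc, m)).1
      = acc ++ pvScanMin m l := by
  induction l generalizing acc m with
  | nil => simp [pvScanMin]
  | cons x t ih => simp [pvScanMin, ih]

-- recurrence of the running-minimum table
theorem pvScanMin_getD (l : List Int) (m : Int) (j : Nat) (hj : j < l.length) :
    (pvScanMin m l).getD j 0 = min ((m :: pvScanMin m l).getD j 0) (l.getD j 0) := by
  induction l generalizing m j with
  | nil => simp at hj
  | cons x t ih =>
    cases j with
    | zero => simp [pvScanMin]
    | succ j =>
      simp only [pvScanMin, List.getD_cons_succ]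
      exact ih (min m x) j (by simpa using hj)

theorem findNumberOfCarsAtMaxSpeed_spec : Claim_equal_findNumberOfCarsAtMaxSpeed := by
  intro xs _
  unfold Spec_findNumberOfCarsAtMaxSpeed
  cases xs with
  | nil => rfl
  | cons x0 t =>
    simp only [findNumberOfCarsAtMaxSpeed, findNumberOfCarsAtMaxSpeed_alt]
    rw [pvBuild]
    set xs := x0 :: t with hxs
    set R := pvScanMin x0 xs with hR
    have hR0 : R.getD 0 0 = x0 := by simp [hR, hxs, pvScanMin]
    have hlen0 : ¬ ((xs.length : Int) = 0) := by
      rw [hxs]; simp only [List.length_cons]; omega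
    simp only [hlen0, if_false, List.nil_append]
    -- R's recurrence in terms of xs indices
    have hRrec : ∀ j : Nat, j + 1 < xs.length →
        R.getD (j+1) 0 = min (R.getD j 0) (xs.getD (j+1) 0) := by
      intro j hj
      have h := pvScanMin_getD xs x0 (j+1) hj
      rw [← hR] at h
      simpa [List.getD_cons_succ] using h
    -- invariant over the prefixes of the range
    have key : ∀ k : Nat, 1 ≤ k → k ≤ xs.length →
        (PySem.List.pyRange 1 (k : Int) 1).foldl
          (fun (st : Int × Int) i =>
            if PySem.List.pyGetD xs i 0 ≤ st.2 then (st.1 + 1, PySem.List.pyGetD xs i 0)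
            else st) (1, PySem.List.pyGetD xs 0 0)
        = (1 + (PySem.List.pyRange 1 (k : Int) 1).foldl
            (fun c i =>
              if PySem.List.pyGetD xs i 0 ≤ PySem.List.pyGetD R (i - 1) 0 then c + 1 else c) 0,
           R.getD (k-1) 0) := by
      intro k hk1 hkn
      induction k with
      | zero => omega
      | succ k ih =>
        cases Nat.eq_or_lt_of_le hk1 with
        | inl h =>
          have hk0 : k = 0 := by omega
          subst hk0
          have hr1 : PySem.List.pyRange 1 ((0+1 : Nat) : Int) 1 = [] := by
            apply PySem.List.pyRange_one_eq_nil; norm_num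
          rw [hr1]
          simp only [List.foldl_nil]
          refine Prod.ext (by norm_num) ?_
          show PySem.List.pyGetD xs 0 0 = R.getD (0+1-1) 0
          rw [PySem.List.pyGetD_zero, hR0]
          rw [hxs]
          rfl
        | inr h =>
          have hk1' : 1 ≤ k := by omega
          have hsplit : PySem.List.pyRange 1 ((k:Int)+1) 1
              = PySem.List.pyRange 1 (k:Int) 1 ++ [(k:Int)] :=
            PySem.List.pyRange_one_succ_right (by exact_mod_cast hk1')
          have hcast : ((k+1 : Nat) : Int) = (k : Int) + 1 := by push_cast; ring
          rw [hcast, hsplit, List.foldl_append, List.foldl_append,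
              ih hk1' (by omega)]
          have hx : PySem.List.pyGetD xs (k : Int) 0 = xs.getD k 0 := by
            simp [PySem.List.pyGetD_natCast]
          have hkm1 : ((k:Int) - 1) = ((k-1 : Nat) : Int) := by omega
          have hRk : PySem.List.pyGetD R ((k:Int) - 1) 0 = R.getD (k-1) 0 := by
            rw [hkm1]; simp [PySem.List.pyGetD_natCast]
          simp only [List.foldl_cons, List.foldl_nil, hx, hRk]
          have hrec : R.getD k 0 = min (R.getD (k-1) 0) (xs.getD k 0) := by
            have h' := hRrec (k-1) (by omega)
            have hk' : k - 1 + 1 = k := by omega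
            rw [hk'] at h'
            exact h'
          by_cases hc : xs.getD k 0 ≤ R.getD (k-1) 0
          · simp only [hc, if_true]
            refine Prod.ext (by ring) ?_
            simp only [Nat.add_sub_cancel, hrec, min_def]
            split_ifs <;> omega
          · simp only [hc, if_false]
            refine Prod.ext rfl ?_
            simp only [Nat.add_sub_cancel, hrec, min_def]
            split_ifs <;> omega
    have hfin := key xs.length (by rw [hxs]; simp only [List.length_cons]; omega) le_rfl
    rw [hfin]
    rfl
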